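-- pv_equiv track=rewrite | github.com/bdoncer/ASD | sorting/exams/zad1.19-20.py | liczenie
-- ===== SOURCE A (Python) =====
-- def liczenie(a):
--     cyfry = [0] * 10
--     while a != 0:
--         cyfry[a % 10] += 1
--         a = a // 10
--     ile_jednokrotnych = 0
--     ile_wielokrotnych = 0
--     for i in range(len(cyfry)):
--         if cyfry[i] == 1:
--             ile_jednokrotnych += 1
--         if cyfry[i] > 1:
--             ile_wielokrotnych += 1
--     odp = 10 * ile_jednokrotnych + (9-ile_wielokrotnych)
--     return odp
-- ===== SOURCE B (Python) =====
-- def liczenie(a):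
--     digits = []
--     while a != 0:
--         digits.append(a % 10)
--         a = a // 10
--     digits.sort()
--     singles = 0
--     multis = 0
--     while digits:
--         run = 1
--         while run < len(digits) and digits[run] == digits[0]:
--             run += 1
--         if run == 1:
--             singles += 1
--         else:
--             multis += 1
--         digits = digits[run:]
--     return 10 * singles + (9 - multis)
-- ===== Notes on version B (the rewrite author's own statement) =====
-- stated objective: alternative
-- what changed: Replaces the length-10 frequency array and the second pass over range(10) by a sort-then-scan: the digits are collected into a list, sorted, and a run-length scan over the sorted list classifies each run as single (length 1) or multiple; no counting table exists.
import Mathlib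
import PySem

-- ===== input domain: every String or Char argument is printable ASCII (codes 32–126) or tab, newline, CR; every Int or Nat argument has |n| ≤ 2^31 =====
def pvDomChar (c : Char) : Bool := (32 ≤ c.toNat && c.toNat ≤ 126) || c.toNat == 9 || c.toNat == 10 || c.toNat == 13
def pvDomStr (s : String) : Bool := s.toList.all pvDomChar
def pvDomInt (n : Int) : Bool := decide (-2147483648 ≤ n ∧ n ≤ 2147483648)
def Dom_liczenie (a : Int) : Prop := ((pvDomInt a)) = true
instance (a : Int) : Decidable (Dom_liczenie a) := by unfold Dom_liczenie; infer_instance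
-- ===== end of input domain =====

-- B replaces A's length-10 frequency array + second pass over range(10) by sort-then-scan:
-- collect the digits into a list, sort it, and run-length-scan the sorted list, classifying
-- each run as single (length 1) or multiple (objective: alternative, same order of cost).
-- Both programs loop forever on a < 0 (a // 10 never reaches 0), so Pre_ requires 0 ≤ a;
-- on 0 ≤ a Python's a % 10 / a // 10 coincide with Nat % and /, so the loops recurse on a.toNat.

-- ===== PORT A =====
-- while a != 0: cyfry[a % 10] += 1; a = a // 10   (on the admitted 0 ≤ a, as a Nat loop)
def liczenieLoopA (n : Nat) (c : List Int) : List Int :=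
  if h : n = 0 then c
  else liczenieLoopA (n / 10) (c.set (n % 10) (c.getD (n % 10) 0 + 1))
termination_by n
decreasing_by exact Nat.div_lt_self (Nat.pos_of_ne_zero h) (by norm_num)

def liczenie (a : Int) : Int :=
  let cyfry := liczenieLoopA a.toNat (List.replicate 10 0)
  -- for i in range(len(cyfry)): two independent ifs updating the two counters
  let p := (List.range 10).foldl
    (fun (p : Int × Int) i =>
      ((if cyfry.getD i 0 = 1 then p.1 + 1 else p.1),
       (if cyfry.getD i 0 > 1 then p.2 + 1 else p.2))) (0, 0)
  10 * p.1 + (9 - p.2)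

-- ===== PORT B =====
-- while a != 0: digits.append(a % 10); a = a // 10
def collectDigits (n : Nat) (acc : List Int) : List Int :=
  if h : n = 0 then acc
  else collectDigits (n / 10) (acc ++ [((n % 10 : Nat) : Int)])
termination_by n
decreasing_by exact Nat.div_lt_self (Nat.pos_of_ne_zero h) (by norm_num)

-- while digits: run = 1; while run < len(digits) and digits[run] == digits[0]: run += 1;
--   classify; digits = digits[run:]
-- the inner while computes run = 1 + length of the leading block of the tail equal to digits[0]
-- (takeWhile is the exact transcription of that scan), and digits[run:] is then the dropWhile.
def scanRuns (l : List Int) (singles multis : Int) : Int × Int :=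
  match l with
  | [] => (singles, multis)
  | x :: xs =>
    let run := 1 + (xs.takeWhile (fun y => y == x)).length
    if run = 1 then scanRuns ((x :: xs).drop run) (singles + 1) multis
    else scanRuns ((x :: xs).drop run) singles (multis + 1)
termination_by l.length
decreasing_by all_goals simp

def liczenie_alt (a : Int) : Int :=
  let digits := PySem.List.sorted (collectDigits a.toNat []) (fun x => x) false
  let p := scanRuns digits 0 0
  10 * p.1 + (9 - p.2)

-- ===== PRECONDITION & SPEC =====
-- Pre_ excludes a < 0: there Python's while loop never terminates (a // 10 stays negative), A returns nothing.
def Pre_liczenie (a : Int) : Prop := 0 ≤ a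
instance (a : Int) : Decidable (Pre_liczenie a) := by unfold Pre_liczenie; infer_instance
def pvWitness_liczenie : Int := 1122
def Spec_liczenie (a : Int) (out : Int) : Prop := out = liczenie_alt a
instance (a : Int) (out : Int) : Decidable (Spec_liczenie a out) := by unfold Spec_liczenie; infer_instance

-- ===== CLAIM (what is proved, stated in full; the proofs are below) =====
def Claim_equal_liczenie : Prop := ∀ (a : Int), Dom_liczenie a → Pre_liczenie a → Spec_liczenie a (liczenie a)

-- ===== LEMMAS AND PROOFS =====

-- dc i n = how many times digit i occurs in n (characterises both programs' digit data)
def dc (i n : Nat) : Nat :=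
  if n = 0 then 0 else (if n % 10 = i then 1 else 0) + dc i (n / 10)
termination_by n
decreasing_by exact Nat.div_lt_self (Nat.pos_of_ne_zero (by assumption)) (by norm_num)

lemma loopA_getD (n : Nat) (c : List Int) (hc : c.length = 10) (i : Nat) (hi : i < 10) :
    (liczenieLoopA n c).getD i 0 = c.getD i 0 + (dc i n : Int) := by
  induction n using Nat.strong_induction_on generalizing c with
  | _ n ih =>
    rw [liczenieLoopA, dc]
    split
    · simp
    · rename_i hn
      rw [ih (n / 10) (Nat.div_lt_self (Nat.pos_of_ne_zero hn) (by norm_num))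
          _ (by simp [hc])]
      have hm : n % 10 < 10 := Nat.mod_lt _ (by norm_num)
      rcases eq_or_ne (n % 10) i with h | h
      · subst h
        rw [List.getD_eq_getElem?_getD, List.getElem?_set_self (by omega)]
        simp
        ring
      · rw [List.getD_eq_getElem?_getD, List.getElem?_set_ne h]
        simp [← List.getD_eq_getElem?_getD, h]

lemma getD_replicate_zero (i : Nat) : (List.replicate 10 (0 : Int)).getD i 0 = 0 := by
  rcases Nat.lt_or_ge i 10 with h | h
  · rw [List.getD_eq_getElem?_getD, List.getElem?_replicate]
    simp [h]
  · rw [List.getD_eq_getElem?_getD, List.getElem?_eq_none (by simpa using h)]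
    rfl

-- the second pass of A = two countP's over range(10)
lemma foldA_eval (c : List Int) (l : List Nat) (j w : Int) :
    l.foldl (fun (p : Int × Int) i =>
      ((if c.getD i 0 = 1 then p.1 + 1 else p.1),
       (if c.getD i 0 > 1 then p.2 + 1 else p.2))) (j, w)
    = (j + (l.countP (fun i => decide (c.getD i 0 = 1)) : Int),
       w + (l.countP (fun i => decide (c.getD i 0 > 1)) : Int)) := by
  induction l generalizing j w with
  | nil => simp
  | cons x xs ih =>
    simp only [List.foldl_cons, List.countP_cons, decide_eq_true_eq, ih]
    split_ifs <;> rw [Prod.ext_iff] <;> refine ⟨?_, ?_⟩ <;> push_cast <;> omega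

-- the collected digit list: count of ↑i is dc i n, and every element is some ↑j with j < 10
lemma collect_count (n : Nat) (acc : List Int) (i : Nat) (hi : i < 10) :
    (collectDigits n acc).count ((i : Nat) : Int) = acc.count ((i : Nat) : Int) + dc i n := by
  induction n using Nat.strong_induction_on generalizing acc with
  | _ n ih =>
    rw [collectDigits, dc]
    split
    · simp
    · rename_i hn
      rw [ih (n / 10) (Nat.div_lt_self (Nat.pos_of_ne_zero hn) (by norm_num))]
      rw [List.count_append]
      rcases eq_or_ne (n % 10) i with h | h
      · simp [h]
        omega
      · have hne : ((n % 10 : Nat) : Int) ≠ ((i : Nat) : Int) := by exact_mod_cast h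
        have h1 : List.count ((i : Nat) : Int) [((n % 10 : Nat) : Int)] = 0 :=
          List.count_eq_zero.mpr (by simpa using hne.symm)
        rw [h1, if_neg h]
        omega

lemma collect_mem (n : Nat) (acc : List Int) (x : Int)
    (hx : x ∈ collectDigits n acc) : x ∈ acc ∨ ∃ j : Nat, j < 10 ∧ x = (j : Int) := by
  induction n using Nat.strong_induction_on generalizing acc with
  | _ n ih =>
    rw [collectDigits] at hx
    split at hx
    · exact Or.inl hx
    · rename_i hn
      rcases ih (n / 10) (Nat.div_lt_self (Nat.pos_of_ne_zero hn) (by norm_num)) _ hx with h | h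
      · rcases List.mem_append.mp h with h | h
        · exact Or.inl h
        · exact Or.inr ⟨n % 10, Nat.mod_lt _ (by norm_num), (List.mem_singleton.mp h)⟩
      · exact Or.inr h

-- countP over range n when two predicates agree everywhere except at x, where q is false
lemma countP_range_except (n x : Nat) (hx : x < n) (p q : Nat → Bool)
    (h : ∀ i, i ≠ x → p i = q i) (hqx : q x = false) :
    (List.range n).countP p = (List.range n).countP q + (if p x then 1 else 0) := by
  induction n with
  | zero => omega
  | succ m ih =>
    rw [List.range_succ, List.countP_append, List.countP_append]
    rcases eq_or_ne x m with rfl | hne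
    · have hcongr : (List.range x).countP p = (List.range x).countP q := by
        apply List.countP_congr
        intro i hi
        rw [List.mem_range] at hi
        rw [h i (by omega)]
      have e1 : List.countP p [x] = if p x = true then 1 else 0 := by
        simp [List.countP_cons]
      have e2 : List.countP q [x] = 0 := by
        simp [hqx]
      rw [hcongr, e1, e2]
      split_ifs <;> omega
    · rw [ih (by omega)]
      have hm2 : p m = q m := h m (fun e => hne e.symm)
      simp only [List.countP_cons, List.countP_nil, hm2]
      split_ifs <;> omega

-- head of dropWhile fails the predicate
lemma head_dropWhile_false {p : Int → Bool} (xs : List Int) (y : Int) (ys : List Int)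
    (h : xs.dropWhile p = y :: ys) : p y = false := by
  induction xs with
  | nil => simp [List.dropWhile] at h
  | cons a as ih =>
    rw [List.dropWhile_cons] at h
    by_cases hpa : p a = true
    · rw [if_pos hpa] at h
      exact ih h
    · rw [if_neg hpa] at h
      injection h with h1 h2
      subst h1
      simpa using hpa

-- the run scan on a sorted list of small digits = A's two range(10) counts
lemma scanRuns_eval (N : Nat) (l : List Int) (hN : l.length ≤ N)
    (hs : l.Pairwise (· ≤ ·))
    (hmem : ∀ x ∈ l, ∃ j : Nat, j < 10 ∧ x = (j : Int)) (s m : Int) :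
    scanRuns l s m
      = (s + ((List.range 10).countP (fun i => decide (l.count ((i : Nat) : Int) = 1)) : Int),
         m + ((List.range 10).countP (fun i => decide (l.count ((i : Nat) : Int) > 1)) : Int)) := by
  induction N generalizing l s m with
  | zero =>
    have : l = [] := List.eq_nil_of_length_eq_zero (by omega)
    subst this
    simp [scanRuns]
  | succ N ih =>
    match l with
    | [] => simp [scanRuns]
    | x :: xs =>
      obtain ⟨jx, hjx, rfl⟩ := hmem x List.mem_cons_self
      set x := ((jx : Nat) : Int) with hxdef
      set t := xs.takeWhile (fun y => y == x) with ht
      set d := xs.dropWhile (fun y => y == x) with hd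
      have hxs : t ++ d = xs := List.takeWhile_append_dropWhile
      -- digits[run:] is d
      have hdrop : (x :: xs).drop (1 + t.length) = d := by
        rw [Nat.add_comm, List.drop_succ_cons, ← hxs, List.drop_left]
      -- every element of t equals x
      have htx : ∀ y ∈ t, y = x := by
        intro y hy
        have := List.mem_takeWhile_imp hy
        simpa using this
      -- x does not occur in d
      have hdsub : d.Sublist xs := by rw [hd]; exact List.dropWhile_sublist _
      have hxd : x ∉ d := by
        intro hxin
        cases hdd : d with
        | nil => rw [hdd] at hxin; exact List.not_mem_nil hxin
        | cons y ys =>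
          have hy : (y == x) = false := head_dropWhile_false xs y ys (by rw [← hd, hdd])
          have hyx : y ≠ x := by simpa using hy
          have hpd : (y :: ys).Pairwise (· ≤ ·) := by
            rw [← hdd]
            exact hs.sublist (List.Sublist.cons _ hdsub)
          have hxle : x ≤ y := by
            have : y ∈ xs := by
              rw [← hxs, hdd]
              exact List.mem_append_right _ List.mem_cons_self
            exact (List.pairwise_cons.mp hs).1 y this
          rw [hdd] at hxin
          rcases List.mem_cons.mp hxin with h | h
          · exact hyx h.symm
          · have := (List.pairwise_cons.mp hpd).1 x h
            omega
      have hcountxd : d.count x = 0 := List.count_eq_zero.mpr hxd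
      -- counts: at x the whole run, elsewhere unchanged
      have hcount_x : (x :: xs).count x = 1 + t.length := by
        rw [← hxs, List.count_cons_self, List.count_append, hcountxd,
          List.count_eq_length.mpr (fun y hy => (htx y hy).symm)]
        omega
      have hcount_ne : ∀ v : Int, v ≠ x → (x :: xs).count v = d.count v := by
        intro v hv
        rw [← hxs, List.count_cons_of_ne (Ne.symm hv), List.count_append,
          List.count_eq_zero.mpr (fun hvt => hv (htx v hvt))]
        omega
      -- hypotheses of the IH for d
      have hlen : d.length ≤ N := by
        have h1 : d.length + t.length = xs.length := by rw [← hxs]; simp [Nat.add_comm]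
        have := hN
        simp at this
        omega
      have hsd : d.Pairwise (· ≤ ·) :=
        hs.sublist (List.Sublist.cons _ hdsub)
      have hmemd : ∀ y ∈ d, ∃ j : Nat, j < 10 ∧ y = (j : Int) := by
        intro y hy
        exact hmem y (List.mem_cons_of_mem _ (hdsub.mem hy))
      -- the two countP's on l versus d
      have hcast : ∀ i : Nat, i ≠ jx → ((i : Nat) : Int) ≠ x := by
        intro i hi
        rw [hxdef]
        exact_mod_cast hi
      have hC1 : (List.range 10).countP (fun i => decide ((x :: xs).count ((i : Nat) : Int) = 1))
          = (List.range 10).countP (fun i => decide (d.count ((i : Nat) : Int) = 1))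
            + (if 1 + t.length = 1 then 1 else 0) := by
        rw [countP_range_except 10 jx hjx _ _
          (fun i hi => by rw [hcount_ne _ (hcast i hi)])
          (by rw [← hxdef]; simp [hcountxd])]
        rw [hxdef] at hcount_x ⊢
        simp [hcount_x]
      have hC2 : (List.range 10).countP (fun i => decide ((x :: xs).count ((i : Nat) : Int) > 1))
          = (List.range 10).countP (fun i => decide (d.count ((i : Nat) : Int) > 1))
            + (if 1 + t.length > 1 then 1 else 0) := by
        rw [countP_range_except 10 jx hjx _ _
          (fun i hi => by rw [hcount_ne _ (hcast i hi)])
          (by rw [← hxdef]; simp [hcountxd])]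
        rw [hxdef] at hcount_x ⊢
        simp [hcount_x]
      -- unfold one step of the scan
      rw [scanRuns]
      simp only [← ht, hdrop]
      by_cases hrun : 1 + t.length = 1
      · rw [if_pos hrun, ih d hlen hsd hmemd, hC1, hC2, if_pos hrun,
          if_neg (by omega : ¬ 1 + t.length > 1)]
        rw [Prod.ext_iff]
        constructor <;> push_cast <;> ring
      · rw [if_neg hrun, ih d hlen hsd hmemd, hC1, hC2, if_neg hrun,
          if_pos (by omega : 1 + t.length > 1)]
        rw [Prod.ext_iff]
        constructor <;> push_cast <;> ring

-- ===== VERDICT (by name: the statement is the Claim_ definition above) =====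
theorem liczenie_spec : Claim_equal_liczenie := by
  intro a _ hpre
  show liczenie a = liczenie_alt a
  simp only [liczenie, liczenie_alt]
  rw [foldA_eval]
  set n := a.toNat with hn
  -- A's array entries are the digit counts
  have hget : ∀ i, i < 10 →
      (liczenieLoopA n (List.replicate 10 0)).getD i 0 = (dc i n : Int) := by
    intro i hi
    rw [loopA_getD n _ (by simp) i hi, getD_replicate_zero]
    ring
  -- B's sorted list has the same counts
  set L := PySem.List.sorted (collectDigits n []) (fun x => x) false with hL
  have hperm : L.Perm (collectDigits n []) := PySem.List.sorted_perm _ _ _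
  have hLcount : ∀ i : Nat, i < 10 → L.count ((i : Nat) : Int) = dc i n := by
    intro i hi
    rw [hperm.count_eq, collect_count n [] i hi]
    simp
  have hLs : L.Pairwise (· ≤ ·) := by
    have := PySem.List.sorted_pairwise (collectDigits n []) (fun x => x)
    simpa using this
  have hLmem : ∀ x ∈ L, ∃ j : Nat, j < 10 ∧ x = (j : Int) := by
    intro x hx
    rcases collect_mem n [] x (hperm.mem_iff.mp hx) with h | h
    · exact absurd h (List.not_mem_nil)
    · exact h
  rw [scanRuns_eval L.length L le_rfl hLs hLmem 0 0]
  have hc1 : (List.range 10).countP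
        (fun i => decide ((liczenieLoopA n (List.replicate 10 0)).getD i 0 = 1))
      = (List.range 10).countP (fun i => decide (L.count ((i : Nat) : Int) = 1)) := by
    apply List.countP_congr
    intro x hx
    rw [List.mem_range] at hx
    simp only [decide_eq_true_eq]
    rw [hget x hx, hLcount x hx]
    exact Nat.cast_eq_one
  have hc2 : (List.range 10).countP
        (fun i => decide ((liczenieLoopA n (List.replicate 10 0)).getD i 0 > 1))
      = (List.range 10).countP (fun i => decide (L.count ((i : Nat) : Int) > 1)) := by
    apply List.countP_congr
    intro x hx
    rw [List.mem_range] at hx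
    simp only [gt_iff_lt, decide_eq_true_eq]
    rw [hget x hx, hLcount x hx]
    exact Nat.one_lt_cast
  rw [hc1, hc2]
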